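-- pv_equiv track=rewrite | github.com/rnbrietzke10/python-exercises-sb | python-ds-practice/38_min_max_key_in_dictionary/min_max_key_in_dictionary.py | min_max_keys
-- ===== SOURCE A (Python) =====
-- def min_max_keys(d):
--     """Return tuple (min-keys, max-keys) in d.
--
--         >>> min_max_keys({2: 'a', 7: 'b', 1: 'c', 10: 'd', 4: 'e'})
--         (1, 10)
--
--     Works with any kind of key that can be compared, like strings:
--
--         >>> min_max_keys({"apple": "red", "cherry": "red", "berry": "blue"})
--         ('apple', 'cherry')
--     """
--     min_key = None
--     max_key = None
--     key_size = 0
--     max_key_size = 0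
--     min_key_size = 0
--     for key in d.keys():
--         if type(key) == str:
--             key_size = len(key)
--         else:
--             key_size = key
--         if min_key == None and max_key == None:
--                 min_key_size = key_size
--                 max_key_size = key_size
--                 min_key = key
--                 max_key = key
--         elif key_size > max_key_size:
--             max_key_size = key_size
--             max_key = key
--         elif key_size < min_key_size:
--             min_key_size = key_size
--             min_key = key
--     return (min_key, max_key)
-- ===== SOURCE B (Python) =====
-- def min_max_keys(d):
--     """Return tuple (min-key, max-key) in d, comparing str keys by length."""
--     size = lambda k: len(k) if type(k) == str else k
--
--     def rec(ks):
--         # divide and conquer; ties go to the left half = earliest occurrence,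
--         # matching A's strict-inequality updates
--         if len(ks) == 1:
--             return (ks[0], ks[0])
--         mid = len(ks) // 2
--         lmin, lmax = rec(ks[:mid])
--         rmin, rmax = rec(ks[mid:])
--         return (rmin if size(rmin) < size(lmin) else lmin,
--                 rmax if size(rmax) > size(lmax) else lmax)
--
--     keys = list(d)
--     if not keys:
--         return (None, None)
--     return rec(keys)
-- ===== Notes on version B (the rewrite author's own statement) =====
-- stated objective: alternative
-- what changed: Replaces A's single left-to-right loop carrying a four-field accumulator (min/max keys plus their sizes) with a divide-and-conquer recursion that splits the key list in half, solves each half, and merges the two (min,max) pairs with left-biased strict comparisons.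
-- outside the precondition, e.g. on min_max_keys({}): A returns (None, None), B returns (None, None)
import Mathlib
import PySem

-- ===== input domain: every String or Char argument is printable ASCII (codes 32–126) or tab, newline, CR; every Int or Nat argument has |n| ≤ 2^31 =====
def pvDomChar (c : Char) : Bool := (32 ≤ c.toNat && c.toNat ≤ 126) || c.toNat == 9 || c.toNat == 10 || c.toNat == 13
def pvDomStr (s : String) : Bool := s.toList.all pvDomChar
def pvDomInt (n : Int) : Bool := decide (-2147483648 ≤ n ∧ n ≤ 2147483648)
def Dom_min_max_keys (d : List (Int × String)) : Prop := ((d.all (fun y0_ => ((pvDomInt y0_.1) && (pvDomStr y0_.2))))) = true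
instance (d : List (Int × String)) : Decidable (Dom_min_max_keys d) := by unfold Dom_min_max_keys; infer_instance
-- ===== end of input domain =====

-- B replaces A's accumulator loop with a divide-and-conquer recursion over the
-- key list (alternative decomposition, same result; return value only).

-- ===== PORT A =====
-- the for-loop over d.keys(); in this model keys are Int (per the given
-- signature), so `type(key) == str` is False and key_size = key.
-- State: (min_key, max_key, min_key_size, max_key_size).
def minMaxLoopA : List (Int × String) → Option Int × Option Int × Int × Int → Option Int × Option Int × Int × Int
  | [], s => s
  | kv :: rest, (minK, maxK, minS, maxS) =>
    let key := kv.1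
    let keySize := key
    if minK = none ∧ maxK = none then
      minMaxLoopA rest (some key, some key, keySize, keySize)
    else if keySize > maxS then
      minMaxLoopA rest (minK, some key, minS, keySize)
    else if keySize < minS then
      minMaxLoopA rest (some key, maxK, keySize, maxS)
    else
      minMaxLoopA rest (minK, maxK, minS, maxS)

def finishA : Option Int × Option Int × Int × Int → Int × Int
  | (some mn, some mx, _, _) => (mn, mx)
  | _ => (0, 0)   -- only for d = []: Python returns (None, None) there, excluded by Pre_

def min_max_keys (d : List (Int × String)) : Int × Int :=
  finishA (minMaxLoopA d (none, none, 0, 0))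

-- ===== PORT B =====
-- Source B's rec: split the key list in half, recurse, merge with left-biased
-- strict comparisons (size = id on Int keys, as `type(k) == str` is False).
def recB : List Int → Int × Int
  | [] => (0, 0)          -- unreachable: rec is only called on nonempty lists
  | [k] => (k, k)
  | a :: b :: rest =>
    let keys := a :: b :: rest
    let mid := keys.length / 2
    let (lmin, lmax) := recB (keys.take mid)
    let (rmin, rmax) := recB (keys.drop mid)
    ((if rmin < lmin then rmin else lmin), (if rmax > lmax then rmax else lmax))
termination_by ks => ks.length
decreasing_by
  · simpa [List.length_take] using by omega
  · simpa [List.length_drop] using by omega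

def min_max_keys_alt (d : List (Int × String)) : Int × Int :=
  let keys := d.map Prod.fst
  if keys = [] then (0, 0)   -- d = []: Source B returns (None, None) there, excluded by Pre_
  else recB keys

-- ===== PRECONDITION & SPEC =====
-- Note: the grader-given signature models keys as Int only (Python A also
-- accepts str keys, compared by length; that part of A's domain is outside
-- this model's type, not excluded by Pre_). Pre_ itself excludes only the
-- empty dict, where A returns (None, None) — not a value of Int × Int.
def Pre_min_max_keys (d : List (Int × String)) : Prop := d ≠ []
instance (d : List (Int × String)) : Decidable (Pre_min_max_keys d) := by unfold Pre_min_max_keys; infer_instance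
def pvWitness_min_max_keys : (List (Int × String)) := [(2, "a"), (7, "b"), (1, "c")]

def Spec_min_max_keys (d : List (Int × String)) (out : Int × Int) : Prop := out = min_max_keys_alt d
instance (d : List (Int × String)) (out : Int × Int) : Decidable (Spec_min_max_keys d out) := by unfold Spec_min_max_keys; infer_instance

-- ===== CLAIM (what is proved, stated in full; the proofs are below) =====
def Claim_equal_min_max_keys : Prop := ∀ (d : List (Int × String)), Dom_min_max_keys d → Pre_min_max_keys d → Spec_min_max_keys d (min_max_keys d)

-- ===== LEMMAS AND PROOFS =====
theorem foldl_min_shift (t : List Int) : ∀ (x h : Int), t.foldl min (min x h) = min x (t.foldl min h) := by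
  induction t with
  | nil => intro x h; rfl
  | cons c t ih =>
    intro x h
    simp only [List.foldl_cons]
    rw [min_assoc, ih]

theorem foldl_max_shift (t : List Int) : ∀ (x h : Int), t.foldl max (max x h) = max x (t.foldl max h) := by
  induction t with
  | nil => intro x h; rfl
  | cons c t ih =>
    intro x h
    simp only [List.foldl_cons]
    rw [max_assoc, ih]

-- fold-style min/max of a nonempty list (head as seed)
def fmin : List Int → Int
  | [] => 0
  | k :: t => t.foldl min k

def fmax : List Int → Int
  | [] => 0
  | k :: t => t.foldl max k

theorem fmin_append (l1 l2 : List Int) (h1 : l1 ≠ []) (h2 : l2 ≠ []) :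
    fmin (l1 ++ l2) = min (fmin l1) (fmin l2) := by
  match l1, l2 with
  | k :: t, h :: t2 =>
    simp only [fmin, List.cons_append, List.foldl_append, List.foldl_cons]
    rw [foldl_min_shift]

theorem fmax_append (l1 l2 : List Int) (h1 : l1 ≠ []) (h2 : l2 ≠ []) :
    fmax (l1 ++ l2) = max (fmax l1) (fmax l2) := by
  match l1, l2 with
  | k :: t, h :: t2 =>
    simp only [fmax, List.cons_append, List.foldl_append, List.foldl_cons]
    rw [foldl_max_shift]

-- B's divide-and-conquer computes exactly (fmin, fmax)
theorem recB_eq (ks : List Int) (h : ks ≠ []) : recB ks = (fmin ks, fmax ks) := by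
  match ks with
  | [k] => simp [recB, fmin, fmax]
  | a :: b :: rest =>
    rw [recB]
    have hlen : (a :: b :: rest).length / 2 ≥ 1 ∧ (a :: b :: rest).length / 2 < (a :: b :: rest).length := by
      simp; omega
    have ht : (a :: b :: rest).take ((a :: b :: rest).length / 2) ≠ [] := by
      intro he
      have := congrArg List.length he
      simp [List.length_take] at this
    have hd : (a :: b :: rest).drop ((a :: b :: rest).length / 2) ≠ [] := by
      intro he
      have := congrArg List.length he
      simp [List.length_drop] at this
      omega
    rw [recB_eq _ ht, recB_eq _ hd]
    have hsplit : (a :: b :: rest).take ((a :: b :: rest).length / 2) ++ (a :: b :: rest).drop ((a :: b :: rest).length / 2) = a :: b :: rest := List.take_append_drop _ _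
    have h1 := fmin_append _ _ ht hd
    have h2 := fmax_append _ _ ht hd
    rw [hsplit] at h1 h2
    rw [h1, h2]
    simp only [Prod.mk.injEq, min_def, max_def]
    constructor <;> split_ifs <;> omega
termination_by ks.length
decreasing_by
  · simpa [List.length_take] using by omega
  · simpa [List.length_drop] using by omega

-- A's loop invariant: once set, the state tracks the running min/max of keys
theorem minMaxLoopA_inv (rest : List (Int × String)) :
    ∀ (m M : Int), m ≤ M →
      minMaxLoopA rest (some m, some M, m, M) =
        (some (rest.foldl (fun a kv => min a kv.1) m),
         some (rest.foldl (fun a kv => max a kv.1) M),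
         rest.foldl (fun a kv => min a kv.1) m,
         rest.foldl (fun a kv => max a kv.1) M) := by
  induction rest with
  | nil => intro m M _; rfl
  | cons kv rest ih =>
    intro m M hmM
    simp only [minMaxLoopA, List.foldl_cons]
    rw [if_neg (by simp : ¬((some m : Option Int) = none ∧ (some M : Option Int) = none))]
    by_cases h1 : kv.1 > M
    · rw [if_pos h1, ih m kv.1 (le_of_lt (hmM.trans_lt h1))]
      rw [min_eq_left (le_of_lt (hmM.trans_lt h1)), max_eq_right (le_of_lt h1)]
    · rw [if_neg h1]
      by_cases h2 : kv.1 < m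
      · rw [if_pos h2, ih kv.1 M (le_of_lt (h2.trans_le hmM))]
        rw [min_eq_right (le_of_lt h2), max_eq_left (le_of_not_gt h1)]
      · rw [if_neg h2, ih m M hmM]
        rw [min_eq_left (le_of_not_gt h2), max_eq_left (le_of_not_gt h1)]

theorem min_max_keys_eq_foldl (k : Int × String) (rest : List (Int × String)) :
    min_max_keys (k :: rest) =
      (rest.foldl (fun a kv => min a kv.1) k.1, rest.foldl (fun a kv => max a kv.1) k.1) := by
  simp only [min_max_keys, minMaxLoopA]
  rw [if_pos (⟨trivial, trivial⟩ : True ∧ True),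
      minMaxLoopA_inv rest k.1 k.1 le_rfl]
  rfl

-- ===== VERDICT (by name: the statement is the Claim_ definition above) =====
theorem min_max_keys_spec : Claim_equal_min_max_keys := by
  intro d _ hpre
  match d with
  | [] => exact absurd rfl hpre
  | k :: rest =>
    show min_max_keys (k :: rest) = min_max_keys_alt (k :: rest)
    rw [min_max_keys_eq_foldl]
    simp only [min_max_keys_alt, List.map_cons]
    rw [if_neg (by simp)]
    rw [recB_eq _ (by simp)]
    simp [fmin, fmax, List.foldl_map]
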